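-- pv_equiv track=rewrite | github.com/racia/research-project | data/examples/TaskExamples.py | construct_example
-- ===== SOURCE A (Python) =====
-- def construct_example(
--     contexts: list[tuple[int, str]],
--     questions: list[tuple[int, str]],
--     answers: list[str],
-- ) -> tuple[str, str]:
--     """
--     Construct an example from the given contexts, questions, and answers.
--
--     :param contexts: list of tuples with the line number and the context sentence
--     :param questions: list of tuples with the line number and the question
--     :param answers: list of answers
--
--     :return: the constructed example
--     """
--     parts = [
--         (
--             f"Context sentences:\n{context[0]}. {context[1]}\n"
--             f"Question:\n{question[0]}. {question[1]}\n"
--             f"Answer: {answer}"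
--         )
--         for context, question, answer in zip(contexts, questions, answers)
--     ]
--     enumerated_ex = "\n\n".join(parts)
--     parts = [
--         (
--             f"Context sentences:\n{context[1]}\n"
--             f"Question:\n{question[1]}\n"
--             f"Answer: {answer}"
--         )
--         for context, question, answer in zip(contexts, questions, answers)
--     ]
--     not_enumerated_ex = "\n\n".join(parts)
--     return enumerated_ex, not_enumerated_ex
-- ===== SOURCE B (Python) =====
-- def construct_example(
--     contexts: list[tuple[int, str]],
--     questions: list[tuple[int, str]],
--     answers: list[str],
-- ) -> tuple[str, str]:
--     """Recursive decomposition: one recursion over the three lists builds both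
--     final strings directly, weaving the "\n\n" separators in, with no
--     intermediate part lists and no join."""
--     def rec(cs, qs, ans):
--         (cn, ct), (qn, qt), a = cs[0], qs[0], ans[0]
--         enum = f"Context sentences:\n{cn}. {ct}\nQuestion:\n{qn}. {qt}\nAnswer: {a}"
--         plain = f"Context sentences:\n{ct}\nQuestion:\n{qt}\nAnswer: {a}"
--         if len(cs) == 1 or len(qs) == 1 or len(ans) == 1:
--             return enum, plain
--         rest_enum, rest_plain = rec(cs[1:], qs[1:], ans[1:])
--         return enum + "\n\n" + rest_enum, plain + "\n\n" + rest_plain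
--
--     if not contexts or not questions or not answers:
--         return "", ""
--     return rec(contexts, questions, answers)
-- ===== Notes on version B (the rewrite author's own statement) =====
-- stated objective: alternative
-- what changed: A makes two comprehension passes building part lists and joins each with '\n\n'; B is a recursion over the three lists that builds both final strings directly, concatenating the separator in as it goes, with no part lists and no join.
import Mathlib
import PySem

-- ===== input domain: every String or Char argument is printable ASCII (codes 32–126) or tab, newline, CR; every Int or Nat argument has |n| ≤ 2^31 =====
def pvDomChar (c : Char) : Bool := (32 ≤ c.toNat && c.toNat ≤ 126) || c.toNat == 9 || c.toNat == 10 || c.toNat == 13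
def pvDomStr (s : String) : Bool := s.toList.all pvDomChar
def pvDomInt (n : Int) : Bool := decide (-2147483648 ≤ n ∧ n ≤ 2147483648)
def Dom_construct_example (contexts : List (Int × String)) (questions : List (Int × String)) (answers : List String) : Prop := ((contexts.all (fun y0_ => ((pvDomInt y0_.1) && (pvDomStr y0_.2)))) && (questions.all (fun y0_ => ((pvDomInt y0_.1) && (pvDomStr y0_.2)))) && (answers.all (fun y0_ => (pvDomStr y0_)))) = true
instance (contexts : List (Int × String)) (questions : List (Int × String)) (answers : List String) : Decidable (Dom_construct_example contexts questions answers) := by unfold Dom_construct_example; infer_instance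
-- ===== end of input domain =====

-- B replaces A's two comprehension-then-join passes by one recursion over the three lists that
-- builds both result strings directly, weaving in the "\n\n" separators (alternative decomposition, same cost).

-- ===== PORT A =====
def pvFmtEnum_construct_example (t : ((Int × String) × (Int × String)) × String) : String :=
  "Context sentences:\n" ++ PySem.Int.toStr t.1.1.1 ++ ". " ++ t.1.1.2 ++ "\n" ++
  "Question:\n" ++ PySem.Int.toStr t.1.2.1 ++ ". " ++ t.1.2.2 ++ "\n" ++
  "Answer: " ++ t.2

def pvFmtPlain_construct_example (t : ((Int × String) × (Int × String)) × String) : String :=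
  "Context sentences:\n" ++ t.1.1.2 ++ "\n" ++
  "Question:\n" ++ t.1.2.2 ++ "\n" ++
  "Answer: " ++ t.2

def construct_example (contexts : List (Int × String)) (questions : List (Int × String)) (answers : List String) : String × String :=
  let triples := (contexts.zip questions).zip answers
  let parts := triples.map pvFmtEnum_construct_example
  let enumerated_ex := PySem.Str.join "\n\n" parts
  let parts2 := triples.map pvFmtPlain_construct_example
  let not_enumerated_ex := PySem.Str.join "\n\n" parts2
  (enumerated_ex, not_enumerated_ex)

-- ===== PORT B =====
-- rec of Source B: heads are consumed, both strings built with separators woven in; the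
-- 'len == 1' guard of Source B is the emptiness test of the tails.
def pvRec_construct_example : List (Int × String) → List (Int × String) → List String → String × String
  | (cn, ct) :: cs, (qn, qt) :: qs, a :: ans =>
    let enum := "Context sentences:\n" ++ PySem.Int.toStr cn ++ ". " ++ ct ++ "\n" ++
                "Question:\n" ++ PySem.Int.toStr qn ++ ". " ++ qt ++ "\n" ++
                "Answer: " ++ a
    let plain := "Context sentences:\n" ++ ct ++ "\n" ++
                 "Question:\n" ++ qt ++ "\n" ++
                 "Answer: " ++ a
    if cs = [] ∨ qs = [] ∨ ans = [] then (enum, plain)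
    else
      let r := pvRec_construct_example cs qs ans
      (enum ++ "\n\n" ++ r.1, plain ++ "\n\n" ++ r.2)
  | _, _, _ => ("", "")

def construct_example_alt (contexts : List (Int × String)) (questions : List (Int × String)) (answers : List String) : String × String :=
  if contexts = [] ∨ questions = [] ∨ answers = [] then ("", "")
  else pvRec_construct_example contexts questions answers

-- ===== PRECONDITION & SPEC =====
def Spec_construct_example (contexts : List (Int × String)) (questions : List (Int × String)) (answers : List String) (out : String × String) : Prop := out = construct_example_alt contexts questions answers
instance (contexts : List (Int × String)) (questions : List (Int × String)) (answers : List String) (out : String × String) : Decidable (Spec_construct_example contexts questions answers out) := by unfold Spec_construct_example; infer_instance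

-- ===== CLAIM =====
def Claim_equal_construct_example : Prop := ∀ (contexts : List (Int × String)) (questions : List (Int × String)) (answers : List String), Dom_construct_example contexts questions answers → Spec_construct_example contexts questions answers (construct_example contexts questions answers)

-- ===== LEMMAS AND PROOFS =====
theorem pv_join_cons_cons (s x y : String) (r : List String) :
    PySem.Str.join s (x :: y :: r) = x ++ (s ++ PySem.Str.join s (y :: r)) := by
  simp [PySem.Str.join, PySem.Chars.join_cons_cons]

theorem pv_join_singleton (s x : String) : PySem.Str.join s [x] = x := by
  simp [PySem.Str.join, PySem.Chars.join, List.intercalate]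

-- the core invariant: on three nonempty lists, A's join-of-maps equals B's recursion
theorem pv_rec_eq (cs : List (Int × String)) (qs : List (Int × String)) (ans : List String)
    (hc : cs ≠ []) (hq : qs ≠ []) (ha : ans ≠ []) :
    (PySem.Str.join "\n\n" (((cs.zip qs).zip ans).map pvFmtEnum_construct_example),
     PySem.Str.join "\n\n" (((cs.zip qs).zip ans).map pvFmtPlain_construct_example))
      = pvRec_construct_example cs qs ans := by
  induction cs generalizing qs ans with
  | nil => exact absurd rfl hc
  | cons c cs' ih =>
    cases qs with
    | nil => exact absurd rfl hq
    | cons q qs' =>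
      cases ans with
      | nil => exact absurd rfl ha
      | cons a ans' =>
        by_cases h : cs' = [] ∨ qs' = [] ∨ ans' = []
        · have hz : (cs'.zip qs').zip ans' = [] := by
            rcases h with h | h | h <;> simp [h]
          simp only [pvRec_construct_example, if_pos h]
          simp [hz, pv_join_singleton, pvFmtEnum_construct_example, pvFmtPlain_construct_example]
        · push_neg at h
          obtain ⟨h1, h2, h3⟩ := h
          have hz : ((cs'.zip qs').zip ans').map pvFmtEnum_construct_example ≠ [] ∧
                    ((cs'.zip qs').zip ans').map pvFmtPlain_construct_example ≠ [] := by
            constructor <;>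
            · simp only [ne_eq, List.map_eq_nil_iff, List.zip_eq_nil_iff] at *
              tauto
          simp only [pvRec_construct_example, if_neg (by tauto : ¬(cs' = [] ∨ qs' = [] ∨ ans' = []))]
          rw [← ih qs' ans' h1 h2 h3]
          obtain ⟨he, hp⟩ := hz
          obtain ⟨x, xs, hx⟩ := List.exists_cons_of_ne_nil he
          obtain ⟨y, ys, hy⟩ := List.exists_cons_of_ne_nil hp
          simp only [List.zip_cons_cons, List.map_cons, hx, hy, pv_join_cons_cons]
          simp [pvFmtEnum_construct_example, pvFmtPlain_construct_example, String.append_assoc]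

-- ===== VERDICT =====
theorem construct_example_spec : Claim_equal_construct_example := by
  intro contexts questions answers _
  unfold Spec_construct_example construct_example construct_example_alt
  by_cases h : contexts = [] ∨ questions = [] ∨ answers = []
  · have hz : (contexts.zip questions).zip answers = [] := by
      rcases h with h | h | h <;> simp [h]
    simp [hz, if_pos h, PySem.Str.join, PySem.Chars.join, List.intercalate]
  · push_neg at h
    simp only [if_neg (by tauto : ¬(contexts = [] ∨ questions = [] ∨ answers = []))]
    exact pv_rec_eq contexts questions answers h.1 h.2.1 h.2.2
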